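-- pv_equiv track=rewrite | github.com/VictorNault/eisape-nault | create_pred_accuracy_figs.py | create_state_color_dict
-- ===== SOURCE A (Python) =====
-- def create_state_color_dict(state_list):
--     """
--     This function maps a State to a color to be visualized in a plot
--     Parameters: state_list - list of every state form DSCI dataset
--     """
--
--     state_color_dict = {}
--     counter = 0
--     for i in state_list:
--         try:
--             state_color_dict[i]
--         except KeyError:
--             if (counter == 0):
--                 state_color_dict[i] = "Orange"
--             if (counter == 1):
--                 state_color_dict[i] = "Blue"
--             if (counter == 2):
--                 state_color_dict[i] = "Yellow"
--             if (counter == 3):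
--                 state_color_dict[i] = "Purple"
--             if (counter == 4):
--                 state_color_dict[i] = "Green"
--             if (counter == 5):
--                 state_color_dict[i] = "Red"
--             if (counter == 6):
--                 state_color_dict[i] = "Black"
--             counter = (counter + 1) % 7
--     return state_color_dict
-- ===== SOURCE B (Python) =====
-- def create_state_color_dict(state_list):
--     """Map each distinct state to a cyclic color.
--
--     Stateless prefix-counting formulation: a state gets an entry at its first
--     occurrence, and its color index is the number of distinct states occurring
--     strictly before that position, taken mod 7.  No counter or seen-set is
--     carried across iterations; each entry is computed independently from its
--     prefix.
--     """
--     colors = ("Orange", "Blue", "Yellow", "Purple", "Green", "Red", "Black")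
--     return {s: colors[len(set(state_list[:i])) % 7]
--             for i, s in enumerate(state_list)
--             if s not in state_list[:i]}
-- ===== Notes on version B (the rewrite author's own statement) =====
-- stated objective: alternative
-- what changed: B carries no state across iterations: instead of A's single pass with a seen-dict, try/except and a counter stepped through a seven-branch if-chain, B emits an entry only at positions that are first occurrences (checked against the prefix state_list[:i]) and computes each color independently as colors[len(set(state_list[:i])) % 7], i.e. by recounting the distinct states in the prefix.
import Mathlib
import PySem

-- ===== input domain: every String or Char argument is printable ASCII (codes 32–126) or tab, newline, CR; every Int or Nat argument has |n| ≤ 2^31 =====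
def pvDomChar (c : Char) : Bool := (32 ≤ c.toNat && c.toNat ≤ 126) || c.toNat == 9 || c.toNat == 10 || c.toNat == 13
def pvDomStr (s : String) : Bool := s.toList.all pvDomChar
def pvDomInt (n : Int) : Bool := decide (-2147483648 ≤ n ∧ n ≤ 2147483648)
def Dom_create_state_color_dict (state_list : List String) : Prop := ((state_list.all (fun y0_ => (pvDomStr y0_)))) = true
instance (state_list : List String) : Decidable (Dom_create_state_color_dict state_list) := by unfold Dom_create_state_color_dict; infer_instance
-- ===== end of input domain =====

-- B replaces A's stateful pass (seen-dict, counter, if-chain) by a stateless comprehension that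
-- recounts the distinct states of each first-occurrence position's prefix; alternative, not faster.

-- ===== PORT A =====
-- one iteration of A's loop: try-lookup, on KeyError the seven-branch if-chain plus counter update
def pvStepA (st : PySem.Dict String String × Int) (i : String) :
    PySem.Dict String String × Int :=
  match st.1.get? i with
  | some _ => st
  | none =>
    let d := st.1
    let c := st.2
    let d := if c == 0 then d.insert i "Orange" else d
    let d := if c == 1 then d.insert i "Blue" else d
    let d := if c == 2 then d.insert i "Yellow" else d
    let d := if c == 3 then d.insert i "Purple" else d
    let d := if c == 4 then d.insert i "Green" else d
    let d := if c == 5 then d.insert i "Red" else d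
    let d := if c == 6 then d.insert i "Black" else d
    (d, PySem.Int.mod (c + 1) 7)

def create_state_color_dict (state_list : List String) : List (String × String) :=
  (state_list.foldl pvStepA (PySem.Dict.empty, 0)).1.items

-- ===== PORT B =====
def pvColors : List String := ["Orange", "Blue", "Yellow", "Purple", "Green", "Red", "Black"]

-- B's dict comprehension: entries only at first occurrences (s ∉ state_list[:i]), so keys are
-- distinct and the dict is this association list; index len(set(...)) % 7 is always in range,
-- so pyGetD with an unused default is exact for colors[... % 7]
def create_state_color_dict_alt (state_list : List String) : List (String × String) :=
  (PySem.List.enumerate state_list 0).filterMap (fun p =>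
    if p.2 ∈ PySem.List.slice state_list none (some p.1) then none
    else some (p.2, PySem.List.pyGetD pvColors
      (PySem.Int.mod ((PySem.Set.ofList (PySem.List.slice state_list none (some p.1))).length : Int) 7) ""))

-- ===== PRECONDITION & SPEC =====
def Spec_create_state_color_dict (state_list : List String) (out : List (String × String)) : Prop := out = create_state_color_dict_alt state_list
instance (state_list : List String) (out : List (String × String)) : Decidable (Spec_create_state_color_dict state_list out) := by unfold Spec_create_state_color_dict; infer_instance

-- ===== CLAIM (what is proved, stated in full; the proofs are below) =====
def Claim_equal_create_state_color_dict : Prop := ∀ (state_list : List String), Dom_create_state_color_dict state_list → Spec_create_state_color_dict state_list (create_state_color_dict state_list)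

-- ===== LEMMAS AND PROOFS =====

-- the common normal form: the association list mapping an ordered list of distinct states to colors
def pvMapColors (u : List String) : List (String × String) :=
  (PySem.List.enumerate u 0).map
    (fun p => (p.2, PySem.List.pyGetD pvColors (PySem.Int.mod p.1 7) ""))

lemma pvMapColors_append (u : List String) (x : String) :
    pvMapColors (u ++ [x]) =
      pvMapColors u ++ [(x, PySem.List.pyGetD pvColors (PySem.Int.mod (u.length : Int) 7) "")] := by
  simp [pvMapColors, PySem.List.enumerate_append, PySem.List.enumerate_cons]

lemma pvKeys_mapColors (u : List String) :
    (PySem.Dict.mk (pvMapColors u)).keys = u := by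
  show (pvMapColors u).map (·.1) = u
  rw [pvMapColors, List.map_map]
  exact PySem.List.map_snd_enumerate u 0

lemma pvGet?_mapColors_none (u : List String) (x : String) (hx : x ∉ u) :
    (PySem.Dict.mk (pvMapColors u)).get? x = none := by
  rw [PySem.Dict.get?_eq_none_iff_not_mem_keys, pvKeys_mapColors]
  exact hx

lemma pvGet?_mapColors_some (u : List String) (x : String) (hx : x ∈ u) :
    (PySem.Dict.mk (pvMapColors u)).get? x ≠ none := by
  rw [Ne, PySem.Dict.get?_eq_none_iff_not_mem_keys, pvKeys_mapColors]
  simpa using hx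

-- A's seven-branch if-chain at a fresh key appends exactly the color for index u.length
lemma pvStepA_fresh (u : List String) (x : String) (hx : x ∉ u) :
    pvStepA (PySem.Dict.mk (pvMapColors u), ((u.length % 7 : Nat) : Int)) x =
      (PySem.Dict.mk (pvMapColors (u ++ [x])), (((u.length + 1) % 7 : Nat) : Int)) := by
  have hnone := pvGet?_mapColors_none u x hx
  have hnc : (PySem.Dict.mk (pvMapColors u)).contains x = false := by
    have := PySem.Dict.contains_eq_isSome_get? (PySem.Dict.mk (pvMapColors u)) x
    rw [this, hnone]; rfl
  have hitems : ∀ v, ((PySem.Dict.mk (pvMapColors u)).insert x v).items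
      = pvMapColors u ++ [(x, v)] := fun v =>
    PySem.Dict.items_insert_of_not_contains _ v hnc
  have hmod7 : PySem.Int.mod (((u.length % 7 : Nat) : Int) + 1) 7
      = (((u.length + 1) % 7 : Nat) : Int) := by
    have h1 : (((u.length % 7 : Nat) : Int) + 1) = (((u.length % 7 + 1 : Nat)) : Int) := by
      push_cast; ring
    rw [h1]
    rw [show (7 : Int) = ((7 : Nat) : Int) from rfl, PySem.Int.mod_natCast]
    congr 1
    omega
  have hcol : pvMapColors (u ++ [x])
      = pvMapColors u ++ [(x, PySem.List.pyGetD pvColors (PySem.Int.mod (u.length : Int) 7) "")] :=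
    pvMapColors_append u x
  have hmodlen : PySem.Int.mod (u.length : Int) 7 = ((u.length % 7 : Nat) : Int) := by
    rw [show (7 : Int) = ((7 : Nat) : Int) from rfl, PySem.Int.mod_natCast]
  unfold pvStepA
  rw [hnone]
  simp only []
  have h7 : u.length % 7 < 7 := Nat.mod_lt _ (by omega)
  apply Prod.ext
  · apply PySem.Dict.ext
    rw [hcol, hmodlen]
    interval_cases h : u.length % 7 <;> simp [hitems] <;> decide
  · simp only
    rw [hmod7]

-- A-side loop invariant: from the state for seen-distinct list u, A's fold builds the color table
lemma pvLoopA (xs : List String) : ∀ (u : List String), u.Nodup →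
    (xs.foldl pvStepA (PySem.Dict.mk (pvMapColors u), ((u.length % 7 : Nat) : Int))).1.items
      = pvMapColors (PySem.Set.update u xs) := by
  induction xs with
  | nil => intro u _; simp [PySem.Set.update_nil]
  | cons x xs ih =>
    intro u hu
    rw [PySem.Set.update_cons]
    by_cases hx : x ∈ u
    · have hstep : pvStepA (PySem.Dict.mk (pvMapColors u), ((u.length % 7 : Nat) : Int)) x
          = (PySem.Dict.mk (pvMapColors u), ((u.length % 7 : Nat) : Int)) := by
        unfold pvStepA
        cases hg : (PySem.Dict.mk (pvMapColors u)).get? x with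
        | none => exact absurd hg (pvGet?_mapColors_some u x hx)
        | some v => rfl
      rw [List.foldl_cons, hstep, PySem.Set.add_of_mem hx]
      exact ih u hu
    · rw [List.foldl_cons, pvStepA_fresh u x hx, PySem.Set.add_of_not_mem hx]
      have h := ih (u ++ [x]) (by
        simp [List.nodup_append, hu]
        intro a ha hax; exact hx (hax ▸ ha))
      simpa using h

-- B-side: the stateless prefix-counting comprehension builds the same color table
lemma pvAltEq (L : List String) :
    create_state_color_dict_alt L = pvMapColors (PySem.Set.ofList L) := by
  induction L using List.reverseRecOn with
  | nil => rfl
  | append_singleton M x ih =>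
    unfold create_state_color_dict_alt at ih ⊢
    rw [PySem.List.enumerate_append, List.filterMap_append]
    have hslice : ∀ (k : Nat), k ≤ M.length →
        PySem.List.slice (M ++ [x]) none (some (k : Int)) = PySem.List.slice M none (some (k : Int)) := by
      intro k hk
      rw [PySem.List.slice_to_natCast, PySem.List.slice_to_natCast,
        List.take_append_of_le_length hk]
    have hcongr : (PySem.List.enumerate M 0).filterMap (fun p =>
        if p.2 ∈ PySem.List.slice (M ++ [x]) none (some p.1) then none
        else some (p.2, PySem.List.pyGetD pvColors
          (PySem.Int.mod ((PySem.Set.ofList (PySem.List.slice (M ++ [x]) none (some p.1))).length : Int) 7) ""))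
        = (PySem.List.enumerate M 0).filterMap (fun p =>
        if p.2 ∈ PySem.List.slice M none (some p.1) then none
        else some (p.2, PySem.List.pyGetD pvColors
          (PySem.Int.mod ((PySem.Set.ofList (PySem.List.slice M none (some p.1))).length : Int) 7) "")) := by
      apply List.filterMap_congr
      intro p hp
      rcases (PySem.List.mem_enumerate_iff _ _ _).mp hp with ⟨k, hk, rfl⟩
      simp only [zero_add]
      rw [hslice k (le_of_lt hk)]
    rw [hcongr, ih]
    have hlast : PySem.List.slice (M ++ [x]) none (some ((0 : Int) + M.length)) = M := by
      rw [zero_add, PySem.List.slice_to_natCast, List.take_left]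
    simp only [PySem.List.enumerate_cons, PySem.List.enumerate_nil, List.filterMap_cons,
      List.filterMap_nil, hlast]
    rw [PySem.Set.ofList_append_singleton]
    by_cases hx : x ∈ M
    · rw [PySem.Set.add_of_mem (by rwa [PySem.Set.mem_ofList]), if_pos hx]
      simp
    · rw [PySem.Set.add_of_not_mem (by rwa [PySem.Set.mem_ofList]), if_neg hx,
        pvMapColors_append]

-- ===== VERDICT (by name: the statement is the Claim_ definition above) =====
theorem create_state_color_dict_spec : Claim_equal_create_state_color_dict := by
  intro state_list _
  unfold Spec_create_state_color_dict create_state_color_dict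
  rw [pvAltEq]
  have h := pvLoopA state_list [] (by simp)
  simp only [pvMapColors, PySem.List.enumerate_nil, List.map_nil, List.length_nil] at h
  rw [PySem.Set.update_nil_left] at h
  exact h
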